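-- pv_equiv track=rewrite | github.com/kelvinlimwan/Birds-Biodiversity | species_richness.py | get_species_richness
-- ===== SOURCE A (Python) =====
-- def get_species_richness(observed_list):
--     '''Return species richness and alphabetically sorted list of bird species
--     in `observed_list`'''
--
--     # create list of species (without repetition)
--     species_list = []
--     for bird in observed_list:
--         if bird not in species_list:
--             species_list.append(bird)
--
--     # compute species richness
--     richness = len(species_list)
--
--     # sort `species_list` alphabetically
--     alph_list = sorted(species_list)
--
--     return (richness, alph_list)
-- ===== SOURCE B (Python) =====
-- def get_species_richness(observed_list):
--     '''Return species richness and alphabetically sorted list of bird species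
--     in `observed_list`'''
--
--     # sort everything first, then drop adjacent duplicates in one pass
--     sorted_all = sorted(observed_list)
--
--     alph_list = []
--     for bird in sorted_all:
--         if not alph_list or bird != alph_list[-1]:
--             alph_list.append(bird)
--
--     richness = len(alph_list)
--     return (richness, alph_list)
-- ===== Notes on version B (the rewrite author's own statement) =====
-- stated objective: faster
-- what changed: A dedups with a repeated 'bird not in species_list' membership scan and sorts afterwards; B sorts the whole list first and removes adjacent duplicates in a single linear pass, so the quadratic membership scan disappears.
import Mathlib
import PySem

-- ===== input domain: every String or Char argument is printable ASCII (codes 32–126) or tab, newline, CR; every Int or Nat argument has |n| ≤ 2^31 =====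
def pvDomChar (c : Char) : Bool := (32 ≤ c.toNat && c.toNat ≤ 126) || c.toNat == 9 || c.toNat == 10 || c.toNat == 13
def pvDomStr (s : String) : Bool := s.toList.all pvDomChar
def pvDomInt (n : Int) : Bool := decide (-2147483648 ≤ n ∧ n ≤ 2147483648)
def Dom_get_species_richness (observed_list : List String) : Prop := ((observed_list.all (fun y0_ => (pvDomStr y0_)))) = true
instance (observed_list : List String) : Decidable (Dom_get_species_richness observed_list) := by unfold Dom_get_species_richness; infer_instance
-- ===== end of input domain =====

-- B sorts the whole list first and drops adjacent duplicates in one pass, replacing A's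
-- quadratic repeated-membership dedup (objective: faster, O(n log n) vs O(n^2)).

-- ===== PORT A =====
def get_species_richness (observed_list : List String) : Int × List String :=
  let species_list := observed_list.foldl
    (fun acc bird => if bird ∈ acc then acc else acc ++ [bird]) []
  let richness : Int := Int.ofNat species_list.length
  let alph_list := PySem.List.sorted species_list (fun x => x) false
  (richness, alph_list)

-- ===== PORT B =====
def get_species_richness_alt (observed_list : List String) : Int × List String :=
  let sorted_all := PySem.List.sorted observed_list (fun x => x) false
  let alph_list := sorted_all.foldl
    (fun acc bird => if acc = [] ∨ acc.getLast? ≠ some bird then acc ++ [bird] else acc) []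
  let richness : Int := Int.ofNat alph_list.length
  (richness, alph_list)

-- ===== PRECONDITION & SPEC =====
def Spec_get_species_richness (observed_list : List String) (out : Int × List String) : Prop := out = get_species_richness_alt observed_list
instance (observed_list : List String) (out : Int × List String) : Decidable (Spec_get_species_richness observed_list out) := by unfold Spec_get_species_richness; infer_instance

-- ===== CLAIM (what is proved, stated in full; the proofs are below) =====
def Claim_equal_get_species_richness : Prop := ∀ (observed_list : List String), Dom_get_species_richness observed_list → Spec_get_species_richness observed_list (get_species_richness observed_list)

-- ===== LEMMAS AND PROOFS =====

-- A's dedup loop: the accumulator stays Nodup and collects exactly the elements seen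
theorem pvA_loop (rest : List String) : ∀ (acc : List String), acc.Nodup →
    (rest.foldl (fun acc bird => if bird ∈ acc then acc else acc ++ [bird]) acc).Nodup ∧
    (∀ a, a ∈ rest.foldl (fun acc bird => if bird ∈ acc then acc else acc ++ [bird]) acc ↔
      a ∈ acc ∨ a ∈ rest) := by
  induction rest with
  | nil => intro acc h; exact ⟨h, fun a => by simp⟩
  | cons x rest ih =>
    intro acc h
    simp only [List.foldl_cons]
    by_cases hx : x ∈ acc
    · simp only [if_pos hx]
      obtain ⟨hn, hm⟩ := ih acc h
      refine ⟨hn, fun a => ?_⟩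
      rw [hm]
      constructor
      · rintro (ha | ha)
        · exact Or.inl ha
        · exact Or.inr (List.mem_cons_of_mem _ ha)
      · rintro (ha | ha)
        · exact Or.inl ha
        · rcases List.mem_cons.mp ha with rfl | ha
          · exact Or.inl hx
          · exact Or.inr ha
    · simp only [if_neg hx]
      have hnd : (acc ++ [x]).Nodup := by
        simp only [List.nodup_append, List.nodup_singleton, true_and]
        refine ⟨h, ?_⟩
        intro a ha b hb
        simp only [List.mem_singleton] at hb
        subst hb
        exact fun he => hx (he ▸ ha)
      obtain ⟨hn, hm⟩ := ih (acc ++ [x]) hnd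
      refine ⟨hn, fun a => ?_⟩
      rw [hm]
      simp only [List.mem_append, List.mem_cons]
      tauto

-- every element of a strictly increasing list is ≤ its last element
theorem pvLe_getLast (l : List String) : ∀ (m : String), l.Pairwise (· < ·) →
    l.getLast? = some m → ∀ a ∈ l, a ≤ m := by
  induction l with
  | nil => intro m _ h; simp at h
  | cons x l ih =>
    intro m hp hl a ha
    cases l with
    | nil =>
      simp at hl ha
      subst hl; subst ha; exact le_refl _
    | cons y t =>
      rw [List.getLast?_cons_cons] at hl
      rcases List.mem_cons.mp ha with rfl | ha
      · have hy : a < y := (List.pairwise_cons.mp hp).1 y (List.mem_cons_self)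
        have := ih m (List.pairwise_cons.mp hp).2 hl y List.mem_cons_self
        exact le_trans (le_of_lt hy) this
      · exact ih m (List.pairwise_cons.mp hp).2 hl a ha

-- B's adjacent-dedup loop: from a ≤-sorted rest it produces a strictly increasing list
-- with exactly the elements of acc ∪ rest
theorem pvB_loop (rest : List String) : ∀ (acc : List String),
    acc.Pairwise (· < ·) → rest.Pairwise (· ≤ ·) →
    (∀ a ∈ acc, ∀ b ∈ rest, a ≤ b) →
    (rest.foldl (fun acc bird => if acc = [] ∨ acc.getLast? ≠ some bird then acc ++ [bird] else acc) acc).Pairwise (· < ·) ∧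
    (∀ a, a ∈ rest.foldl (fun acc bird => if acc = [] ∨ acc.getLast? ≠ some bird then acc ++ [bird] else acc) acc ↔
      a ∈ acc ∨ a ∈ rest) := by
  induction rest with
  | nil => intro acc hp _ _; exact ⟨hp, fun a => by simp⟩
  | cons x rest ih =>
    intro acc hp hr hle
    have hr' : rest.Pairwise (· ≤ ·) := (List.pairwise_cons.mp hr).2
    have hxr : ∀ b ∈ rest, x ≤ b := (List.pairwise_cons.mp hr).1
    simp only [List.foldl_cons]
    by_cases hc : acc = [] ∨ acc.getLast? ≠ some x
    · simp only [if_pos hc]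
      have hax : ∀ a ∈ acc, a < x := by
        intro a ha
        rcases hc with hc | hc
        · subst hc; simp at ha
        · have hlast : ∃ m, acc.getLast? = some m := by
            cases hacc : acc.getLast? with
            | none => rw [List.getLast?_eq_none_iff] at hacc; subst hacc; simp at ha
            | some m => exact ⟨m, rfl⟩
          obtain ⟨m, hm⟩ := hlast
          have ham : a ≤ m := pvLe_getLast acc m hp hm a ha
          have hmx : m ≤ x := by
            refine hle m ?_ x List.mem_cons_self
            exact List.mem_of_getLast? hm
          have hmne : m ≠ x := fun h => hc (h ▸ hm)
          exact lt_of_le_of_lt ham (lt_of_le_of_ne hmx hmne)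
      have hp' : (acc ++ [x]).Pairwise (· < ·) := by
        rw [List.pairwise_append]
        exact ⟨hp, List.pairwise_singleton _ _, fun a ha b hb => by
          simp at hb; subst hb; exact hax a ha⟩
      have hle' : ∀ a ∈ acc ++ [x], ∀ b ∈ rest, a ≤ b := by
        intro a ha b hb
        rcases List.mem_append.mp ha with ha | ha
        · exact hle a ha b (List.mem_cons_of_mem _ hb)
        · simp at ha; subst ha; exact hxr b hb
      obtain ⟨h1, h2⟩ := ih (acc ++ [x]) hp' hr' hle'
      refine ⟨h1, fun a => ?_⟩
      rw [h2]
      simp only [List.mem_append, List.mem_cons]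
      tauto
    · simp only [if_neg hc]
      rw [not_or, not_not] at hc
      have hxacc : x ∈ acc := by
        exact List.mem_of_getLast? hc.2
      have hle' : ∀ a ∈ acc, ∀ b ∈ rest, a ≤ b :=
        fun a ha b hb => hle a ha b (List.mem_cons_of_mem _ hb)
      obtain ⟨h1, h2⟩ := ih acc hp hr' hle'
      refine ⟨h1, fun a => ?_⟩
      rw [h2]
      simp only [List.mem_cons]
      constructor
      · rintro (ha | ha)
        · exact Or.inl ha
        · exact Or.inr (Or.inr ha)
      · rintro (ha | rfl | ha)
        · exact Or.inl ha
        · exact Or.inl hxacc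
        · exact Or.inr ha

-- ===== VERDICT (by name: the statement is the Claim_ definition above) =====
theorem get_species_richness_spec : Claim_equal_get_species_richness := by
  intro observed_list _
  unfold Spec_get_species_richness get_species_richness get_species_richness_alt
  simp only []
  set S := observed_list.foldl (fun acc bird => if bird ∈ acc then acc else acc ++ [bird]) [] with hS
  set sa := PySem.List.sorted observed_list (fun x => x) false with hsa
  set C := sa.foldl (fun acc bird => if acc = [] ∨ acc.getLast? ≠ some bird then acc ++ [bird] else acc) [] with hC
  obtain ⟨hSnd, hSmem⟩ := pvA_loop observed_list [] List.nodup_nil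
  have hsaPW : sa.Pairwise (· ≤ ·) := by
    have := PySem.List.sorted_pairwise (xs := observed_list) (key := fun x => x)
    simpa using this
  obtain ⟨hCpw, hCmem⟩ := pvB_loop sa [] List.Pairwise.nil hsaPW (by intro a ha; simp at ha)
  have hmemEq : ∀ a, a ∈ C ↔ a ∈ S := by
    intro a
    rw [hCmem a, hSmem a]
    have : a ∈ sa ↔ a ∈ observed_list :=
      PySem.List.mem_sorted observed_list (fun x => x) false a
    simp [this]
  have hCnd : C.Nodup := hCpw.imp (fun h => ne_of_lt h)
  have hperm : C.Perm S := (List.perm_ext_iff_of_nodup hCnd hSnd).mpr hmemEq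
  have hsorted : PySem.List.sorted S (fun x => x) false = C :=
    PySem.List.sorted_eq_of_perm_of_pairwise_lt S C (fun x => x) hperm hCpw
  have hlen : S.length = C.length := hperm.length_eq.symm
  rw [hsorted, hlen]
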